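-- pv_equiv track=rewrite | github.com/SakuOrdrTab/golf_card_game | src/player/advanced_computer_player.py | _pairs_in_others_tablecards
-- ===== SOURCE A (Python) =====
-- from collections import Counter
--
-- def _pairs_in_others_tablecards(others : list) -> list:
--     res = []
--     for player in others:
--         for row in player:
--             strs = [item[1:] for item in row if item != "XX"]
--             counts = Counter(strs)
--             res.append([item for item, count in counts.items() if count > 1])
--     return res
-- ===== SOURCE B (Python) =====
-- def _pairs_in_others_tablecards(others : list) -> list:
--     def row_dups(row):
--         strs = [item[1:] for item in row if item != "XX"]
--         out = []
--         pre = []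
--         rest = strs
--         while rest:
--             v = rest[0]
--             rest = rest[1:]
--             if v not in pre and v in rest:
--                 out.append(v)
--             pre.append(v)
--         return out
--     return [row_dups(row) for player in others for row in player]
-- ===== Notes on version B (the rewrite author's own statement) =====
-- stated objective: alternative
-- what changed: Replaces the Counter frequency table and count>1 filter by an online two-zone sweep per row (values move from rest to pre, emitted at their first occurrence when another copy is still ahead in rest), with rows produced by a flat comprehension instead of nested accumulator appends.
import Mathlib
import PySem

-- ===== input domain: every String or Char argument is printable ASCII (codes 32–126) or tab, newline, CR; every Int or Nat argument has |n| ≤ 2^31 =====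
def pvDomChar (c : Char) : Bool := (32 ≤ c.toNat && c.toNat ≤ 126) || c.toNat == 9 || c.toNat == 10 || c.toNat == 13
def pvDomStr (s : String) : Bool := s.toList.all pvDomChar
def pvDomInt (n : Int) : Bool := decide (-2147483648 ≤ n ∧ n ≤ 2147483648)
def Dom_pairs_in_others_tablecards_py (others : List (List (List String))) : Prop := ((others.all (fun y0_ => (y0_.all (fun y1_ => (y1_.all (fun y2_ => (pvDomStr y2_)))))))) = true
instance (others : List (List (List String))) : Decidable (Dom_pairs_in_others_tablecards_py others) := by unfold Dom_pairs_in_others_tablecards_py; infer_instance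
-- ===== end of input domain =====

-- B replaces A's Counter frequency table (build counts, then filter count>1) by an online
-- two-zone scan of each row: a single sweep moving values from `rest` to `pre`, emitting a
-- value the moment it is seen for the first time (not in `pre`) while another copy is still
-- ahead (in `rest`); rows are produced by a flat comprehension instead of nested appends.
-- Objective: alternative (same cost, no auxiliary frequency table; return-value equivalence).

-- ===== PORT A =====
-- per-row body of A (helper of the transliteration, not a simplification)
def pvRowA (row : List String) : List String :=
  let strs := (row.filter (fun item => item != "XX")).map
    (fun item => PySem.Str.slice item (some 1) none)
  let counts := PySem.Dict.counter strs
  (counts.items.filter (fun p => decide (p.2 > 1))).map (fun p => p.1)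

def pairs_in_others_tablecards_py (others : List (List (List String))) : List (List String) :=
  others.foldl (fun res player =>
    player.foldl (fun res row => res ++ [pvRowA row]) res) []

-- ===== PORT B =====
-- B's while-loop: move the head of `rest` to `pre`, appending it to `out` when it is a
-- first occurrence with another copy still ahead
def pvRowLoop (out pre rest : List String) : List String :=
  match rest with
  | [] => out
  | v :: rest' =>
      pvRowLoop (if !pre.contains v && rest'.contains v then out ++ [v] else out)
        (pre ++ [v]) rest'

def pvRowDups (row : List String) : List String :=
  let strs := (row.filter (fun item => item != "XX")).map
    (fun item => PySem.Str.slice item (some 1) none)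
  pvRowLoop [] [] strs

def pairs_in_others_tablecards_py_alt (others : List (List (List String))) : List (List String) :=
  others.flatMap (fun player => player.map pvRowDups)

-- ===== PRECONDITION & SPEC =====
def Spec_pairs_in_others_tablecards_py (others : List (List (List String))) (out : List (List String)) : Prop := out = pairs_in_others_tablecards_py_alt others
instance (others : List (List (List String))) (out : List (List String)) : Decidable (Spec_pairs_in_others_tablecards_py others out) := by unfold Spec_pairs_in_others_tablecards_py; infer_instance

-- ===== CLAIM (what is proved, stated in full; the proofs are below) =====
def Claim_equal_pairs_in_others_tablecards_py : Prop := ∀ (others : List (List (List String))), Dom_pairs_in_others_tablecards_py others → Spec_pairs_in_others_tablecards_py others (pairs_in_others_tablecards_py others)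

-- ===== LEMMAS AND PROOFS =====

-- PySem.Set.ofList unfolds one step as cons + filter
theorem pvOfList_cons (v : String) (r : List String) :
    PySem.Set.ofList (v :: r) = v :: (PySem.Set.ofList r).filter (fun w => w != v) := by
  have h1 : PySem.Set.ofList (v :: r) = PySem.Set.update [v] r := by
    rw [PySem.Set.ofList_eq_foldl]
    rfl
  rw [h1, PySem.Set.update_eq_append_filter]
  simp only [List.cons_append, List.nil_append, List.cons.injEq, true_and]
  apply List.filter_congr
  intro w _
  by_cases h : w = v <;> simp_all [PySem.Set.contains_eq_listContains, bne]

-- invariant of B's two-zone sweep: it emits, in first-occurrence order, the values of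
-- `rest` not already in `pre` that occur at least twice in `rest`
theorem pvRowLoop_eq (rest : List String) : ∀ (pre out : List String),
    pvRowLoop out pre rest
      = out ++ (PySem.Set.ofList rest).filter
          (fun v => !pre.contains v && decide (2 ≤ rest.count v)) := by
  induction rest with
  | nil => intro pre out; simp [pvRowLoop, PySem.Set.ofList]
  | cons v r ih =>
    intro pre out
    rw [pvRowLoop, ih, pvOfList_cons]
    rw [List.filter_cons, List.filter_filter]
    have hcnt : (decide (2 ≤ (v :: r).count v)) = r.contains v := by
      rw [Bool.eq_iff_iff]
      have h1 : (v :: r).count v = r.count v + 1 := by simp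
      rw [h1]
      rw [decide_eq_true_iff]
      simp only [List.contains_iff_mem]
      rw [← List.count_pos_iff]
      omega
    have hcond : (!pre.contains v && decide (2 ≤ (v :: r).count v))
        = (!pre.contains v && r.contains v) := by rw [hcnt]
    have htail : ∀ w, ((!(pre ++ [v]).contains w && decide (2 ≤ r.count w)) : Bool)
        = (!pre.contains w && decide (2 ≤ (v :: r).count w) && (w != v)) := by
      intro w
      by_cases hwv : w = v
      · subst hwv; simp
      · have hne : (w == v) = false := by simpa using hwv
        have hc : (v :: r).count w = r.count w := by
          rw [List.count_cons]
          simp [Ne.symm hwv]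
        have hbne : (w != v) = true := by simp [bne, hne]
        simp [hc, hbne, hwv, Bool.and_comm]
    rw [List.filter_congr (fun w _ => htail w), hcond]
    split_ifs with h
    · simp
    · simp

-- the per-row results of the two ports agree
theorem pvRow_eq (row : List String) : pvRowA row = pvRowDups row := by
  simp only [pvRowA, pvRowDups]
  rw [PySem.Dict.items_counter, List.filter_map, List.map_map, pvRowLoop_eq]
  simp only [Function.comp_def, List.nil_append, List.contains_nil, Bool.not_false,
    Bool.true_and]
  rw [List.map_id_fun']
  apply List.filter_congr
  intro v _
  rw [Bool.eq_iff_iff]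
  simp only [decide_eq_true_eq]
  omega

-- ===== VERDICT (by name: the statement is the Claim_ definition above) =====
theorem pairs_in_others_tablecards_py_spec : Claim_equal_pairs_in_others_tablecards_py := by
  intro others _
  unfold Spec_pairs_in_others_tablecards_py
  unfold pairs_in_others_tablecards_py pairs_in_others_tablecards_py_alt
  rw [PySem.List.foldl_congr_mem others _
    (fun res player => res ++ player.map pvRowA)
    [] (fun acc x _ => PySem.List.foldl_append_singleton_eq_map pvRowA x acc)]
  rw [PySem.List.foldl_append_eq_flatMap]
  rw [show pvRowA = pvRowDups from funext pvRow_eq]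
  simp
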